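-- pv_equiv track=rewrite | github.com/yourworstnightmare1/proxy-list | scripts/apply_pr_diff_links.py | split_provider_sections
-- ===== SOURCE A (Python) =====
-- def split_provider_sections(lines: list[str]) -> list[tuple[str, int, int]]:
--     indices: list[tuple[str, int]] = []
--     for i, line in enumerate(lines):
--         if line.startswith("# "):
--             indices.append((line.strip(), i))
--     blocks: list[tuple[str, int, int]] = []
--     for j, (h, start) in enumerate(indices):
--         end = indices[j + 1][1] if j + 1 < len(indices) else len(lines)
--         blocks.append((h, start, end))
--     return blocks
-- ===== SOURCE B (Python) =====
-- def split_provider_sections(lines: list[str]) -> list[tuple[str, int, int]]: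
--     # Single pass keeping the currently open block as running state,
--     # instead of building an index table and pairing by offset lookup.
--     blocks: list[tuple[str, int, int]] = []
--     header: str | None = None
--     start = 0
--     for i, line in enumerate(lines):
--         if line.startswith("# "):
--             if header is not None:
--                 blocks.append((header, start, i))
--             header, start = line.strip(), i
--     if header is not None:
--         blocks.append((header, start, len(lines)))
--     return blocks
-- ===== Notes on version B (the rewrite author's own statement) =====
-- stated objective: simpler
-- what changed: B replaces A's two passes (build an index table of headers, then pair each entry with the next entry's position via offset lookup) with one pass that keeps the currently open block as running state and flushes it when the next header or the end of input is reached.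
import Mathlib
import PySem

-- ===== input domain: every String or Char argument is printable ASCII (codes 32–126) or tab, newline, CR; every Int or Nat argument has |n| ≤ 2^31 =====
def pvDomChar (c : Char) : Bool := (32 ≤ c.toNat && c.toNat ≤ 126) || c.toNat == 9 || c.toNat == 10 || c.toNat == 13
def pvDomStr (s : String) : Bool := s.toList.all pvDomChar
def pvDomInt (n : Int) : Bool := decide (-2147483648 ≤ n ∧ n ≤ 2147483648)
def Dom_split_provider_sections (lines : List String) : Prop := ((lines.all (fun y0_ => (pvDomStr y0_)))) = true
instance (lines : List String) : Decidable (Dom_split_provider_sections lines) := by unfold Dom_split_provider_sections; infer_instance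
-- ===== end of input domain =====

-- B replaces A's index-table + offset-lookup pairing by a single stateful pass
-- that keeps the open block as running state (objective: simpler decomposition).


-- ===== PORT A =====
-- loop body of A's first pass: collect (line.strip(), i) for header lines
def pvAIdxBody (acc : List (String × Int)) (p : Int × String) : List (String × Int) :=
  if PySem.Str.startswith p.2 "# " then acc ++ [(PySem.Str.strip p.2, p.1)] else acc

-- loop body of A's second pass: end = indices[j+1][1] if j+1 < len(indices) else len(lines)
-- (the 'none' branch of the lookup is unreachable: j+1 is in range when the guard holds)
def pvABlockBody (indices : List (String × Int)) (nlines : Int)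
    (blocks : List (String × Int × Int)) (q : Int × (String × Int)) : List (String × Int × Int) :=
  let e : Int :=
    if q.1 + 1 < (indices.length : Int) then
      match PySem.List.pyGet? indices (q.1 + 1) with
      | some r => r.2
      | none => 0
    else nlines
  blocks ++ [(q.2.1, q.2.2, e)]

def split_provider_sections (lines : List String) : List (String × Int × Int) :=
  let indices : List (String × Int) := (PySem.List.enumerate lines).foldl pvAIdxBody []
  (PySem.List.enumerate indices).foldl (pvABlockBody indices (lines.length : Int)) []

-- ===== PORT B =====
-- loop body of B's single pass: state = (emitted blocks, currently open block)
def pvBBody (st : List (String × Int × Int) × Option (String × Int)) (p : Int × String) :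
    List (String × Int × Int) × Option (String × Int) :=
  if PySem.Str.startswith p.2 "# " then
    match st.2 with
    | some hs => (st.1 ++ [(hs.1, hs.2, p.1)], some (PySem.Str.strip p.2, p.1))
    | none => (st.1, some (PySem.Str.strip p.2, p.1))
  else st

-- B's final flush of the still-open block
def pvBFlush (n : Int) (st : List (String × Int × Int) × Option (String × Int)) :
    List (String × Int × Int) :=
  match st.2 with
  | some hs => st.1 ++ [(hs.1, hs.2, n)]
  | none => st.1

def split_provider_sections_alt (lines : List String) : List (String × Int × Int) :=
  pvBFlush (lines.length : Int) ((PySem.List.enumerate lines).foldl pvBBody ([], none))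

-- ===== PRECONDITION & SPEC =====
def Spec_split_provider_sections (lines : List String) (out : List (String × Int × Int)) : Prop := out = split_provider_sections_alt lines
instance (lines : List String) (out : List (String × Int × Int)) : Decidable (Spec_split_provider_sections lines out) := by unfold Spec_split_provider_sections; infer_instance

-- ===== CLAIM (what is proved, stated in full; the proofs are below) =====
def Claim_equal_split_provider_sections : Prop := ∀ (lines : List String), Dom_split_provider_sections lines → Spec_split_provider_sections lines (split_provider_sections lines)

-- ===== LEMMAS AND PROOFS =====

-- proof-side: the list of (stripped header, position) pairs starting at index i
def pvIdx : List String → Int → List (String × Int)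
  | [], _ => []
  | l :: ls, i =>
    if PySem.Str.startswith l "# " then (PySem.Str.strip l, i) :: pvIdx ls (i + 1)
    else pvIdx ls (i + 1)

-- proof-side: pair each header with the next header's position (the last with n)
def pvPair : List (String × Int) → Int → List (String × Int × Int)
  | [], _ => []
  | [(h, s)], n => [(h, s, n)]
  | (h, s) :: (h₂, s₂) :: rest, n => (h, s, s₂) :: pvPair ((h₂, s₂) :: rest) n

lemma pvA1 (lines : List String) : ∀ (s : Int) (acc : List (String × Int)),
    (PySem.List.enumerate lines s).foldl pvAIdxBody acc = acc ++ pvIdx lines s := by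
  induction lines with
  | nil => simp [pvIdx, PySem.List.enumerate_nil]
  | cons l ls ih =>
    intro s acc
    rw [PySem.List.enumerate_cons]
    simp only [List.foldl_cons, pvAIdxBody, pvIdx]
    split <;> simp [ih]

lemma pvB1 (lines : List String) : ∀ (s : Int) (acc : List (String × Int × Int))
    (op : Option (String × Int)) (n : Int),
    pvBFlush n ((PySem.List.enumerate lines s).foldl pvBBody (acc, op)) =
      acc ++ pvPair ((match op with | some hs => hs :: pvIdx lines s | none => pvIdx lines s)) n := by
  induction lines with
  | nil =>
    intro s acc op n
    cases op with
    | none => simp [PySem.List.enumerate_nil, pvBFlush, pvIdx, pvPair]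
    | some hs => simp [PySem.List.enumerate_nil, pvBFlush, pvIdx, pvPair]
  | cons l ls ih =>
    intro s acc op n
    rw [PySem.List.enumerate_cons]
    simp only [List.foldl_cons]
    by_cases hh : PySem.Chars.startswith l.toList ['#', ' '] = true
    · cases op with
      | none => simp [pvBBody, pvIdx, hh, ih]
      | some hs => simp [pvBBody, pvIdx, hh, ih, pvPair]
    · cases op with
      | none => simp [pvBBody, pvIdx, hh, ih]
      | some hs => simp [pvBBody, pvIdx, hh, ih]

lemma pvA2 (ind : List (String × Int)) (n : Int) :
    ∀ (suf pre : List (String × Int)), ind = pre ++ suf →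
    ∀ (acc : List (String × Int × Int)),
    (PySem.List.enumerate suf (pre.length : Int)).foldl (pvABlockBody ind n) acc =
      acc ++ pvPair suf n := by
  intro suf
  induction suf with
  | nil => intro pre _ acc; simp [PySem.List.enumerate_nil, pvPair]
  | cons hd rest ih =>
    intro pre hind acc
    rw [PySem.List.enumerate_cons]
    simp only [List.foldl_cons]
    have hlen : (ind.length : Int) = (pre.length : Int) + 1 + (rest.length : Int) := by
      subst hind; simp [List.length_append]; omega
    cases rest with
    | nil =>
      have hguard : ¬ ((pre.length : Int) + 1 < (ind.length : Int)) := by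
        rw [hlen]; simp
      simp only [pvABlockBody, hguard]
      rw [PySem.List.enumerate_nil]
      simp [pvPair]
    | cons hd₂ rest₂ =>
      have hguard : (pre.length : Int) + 1 < (ind.length : Int) := by
        rw [hlen]; simp
      have hget : PySem.List.pyGet? ind ((pre.length : Int) + 1) = some hd₂ := by
        have : ind = (pre ++ [hd]) ++ hd₂ :: rest₂ := by simp [hind]
        rw [this]
        have hc : (pre.length : Int) + 1 = ((pre ++ [hd]).length : Int) := by
          simp [List.length_append]
        rw [hc]
        exact PySem.List.pyGet?_append_length (pre ++ [hd]) rest₂ hd₂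
      simp only [pvABlockBody, hget, if_pos hguard]
      have hstep : (pre.length : Int) + 1 = ((pre ++ [hd]).length : Int) := by
        simp [List.length_append]
      rw [hstep, ih (pre ++ [hd]) (by simp [hind])]
      simp [pvPair]

lemma pvA_eq (lines : List String) :
    split_provider_sections lines = pvPair (pvIdx lines 0) (lines.length : Int) := by
  unfold split_provider_sections
  rw [show (PySem.List.enumerate lines).foldl pvAIdxBody [] =
        (PySem.List.enumerate lines 0).foldl pvAIdxBody [] from rfl, pvA1]
  have := pvA2 (pvIdx lines 0) (lines.length : Int) (pvIdx lines 0) [] (by simp) []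
  simpa using this

lemma pvB_eq (lines : List String) :
    split_provider_sections_alt lines = pvPair (pvIdx lines 0) (lines.length : Int) := by
  unfold split_provider_sections_alt
  have := pvB1 lines 0 [] none (lines.length : Int)
  simpa using this

-- ===== VERDICT (by name: the statement is the Claim_ definition above) =====
theorem split_provider_sections_spec : Claim_equal_split_provider_sections := by
  intro lines _
  unfold Spec_split_provider_sections
  rw [pvA_eq, pvB_eq]
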